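-- pv_equiv track=rewrite | github.com/juanjoseferna/OnlineJudgeSolutions | 10-20-30 246.py | jugar
-- ===== SOURCE A (Python) =====
-- WINNERS = [10,20,30]
--
-- def jugar(mano,juego,njuegos,i):
--     if(len(juego[i]) >= 3):
--         if(sum([juego[i][0],juego[i][1],juego[i][-1]]) in WINNERS):
--             mano.append(juego[i].pop(0))
--             mano.append(juego[i].pop(0))
--             mano.append(juego[i].pop())
--             if(len(juego[i]) == 0):
--                 njuegos-= 1
--                 juego.pop(i)
--                 i -= 1
--             else:
--                 return jugar(mano,juego,njuegos,i)
--
--         elif(sum([juego[i][0],juego[i][-1],juego[i][-2]]) in WINNERS):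
--             mano.append(juego[i].pop(0))
--             tmp = juego[i].pop()
--             mano.append(juego[i].pop())
--             mano.append(tmp)
--             if(len(juego[i]) == 0):
--                 njuegos-= 1
--                 juego.pop(i)
--                 i -= 1
--             else:
--                 return jugar(mano,juego,njuegos,i)
--
--         elif(sum([juego[i][-1],juego[i][-2],juego[i][-3]]) in WINNERS):
--             tmp1 = juego[i].pop()
--             tmp2 = juego[i].pop()
--             mano.append(juego[i].pop())
--             mano.append(tmp2)
--             mano.append(tmp1)
--             if(len(juego[i]) == 0):
--                 njuegos-= 1
--                 juego.pop(i)
--                 i -= 1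
--             else:
--                 return jugar(mano,juego,njuegos,i)
--     return mano,juego,njuegos,i
-- ===== SOURCE B (Python) =====
-- WINNERS = [10, 20, 30]
--
-- def jugar(mano, juego, njuegos, i):
--     # Iterative version: a while loop over the selected pile (aliased in place),
--     # reading the relevant cards up front and deleting them with `del`.
--     pila = juego[i]
--     while len(pila) >= 3:
--         a, b = pila[0], pila[1]
--         x, y, z = pila[-3], pila[-2], pila[-1]
--         if a + b + z in WINNERS:
--             mano += [a, b, z]
--             del pila[-1]
--             del pila[0]
--             del pila[0]
--         elif a + y + z in WINNERS:
--             mano += [a, y, z]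
--             del pila[-1]
--             del pila[-1]
--             del pila[0]
--         elif x + y + z in WINNERS:
--             mano += [x, y, z]
--             del pila[-1]
--             del pila[-1]
--             del pila[-1]
--         else:
--             break
--         if not pila:
--             njuegos -= 1
--             juego.pop(i)
--             i -= 1
--             break
--     return mano, juego, njuegos, i
-- ===== Notes on version B (the rewrite author's own statement) =====
-- stated objective: simpler
-- what changed: Replaced the tail recursion (which re-indexes juego[i] and shuffles cards through tmp variables every call) by a single while loop over the selected pile that reads the five relevant cards up front, appends the winning triple at once and deletes with del; the empty-pile cleanup happens once inside the loop before break.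
import Mathlib
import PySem

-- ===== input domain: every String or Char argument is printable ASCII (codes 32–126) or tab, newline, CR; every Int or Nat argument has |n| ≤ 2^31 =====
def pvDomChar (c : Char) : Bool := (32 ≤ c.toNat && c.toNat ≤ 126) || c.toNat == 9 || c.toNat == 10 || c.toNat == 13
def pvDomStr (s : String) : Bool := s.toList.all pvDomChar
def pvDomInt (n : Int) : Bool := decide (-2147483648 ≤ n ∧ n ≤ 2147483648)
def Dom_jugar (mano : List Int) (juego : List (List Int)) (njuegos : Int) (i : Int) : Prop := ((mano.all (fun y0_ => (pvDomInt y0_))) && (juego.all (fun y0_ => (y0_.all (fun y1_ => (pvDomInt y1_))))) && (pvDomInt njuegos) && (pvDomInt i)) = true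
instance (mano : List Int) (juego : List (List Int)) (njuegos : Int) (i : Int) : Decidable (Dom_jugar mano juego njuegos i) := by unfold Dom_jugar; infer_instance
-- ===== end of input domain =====

-- B rewrites A's tail recursion as a single while loop over the selected pile (simpler, constant stack);
-- both Pythons mutate mano/juego in place the same way, the theorems here are about the RETURN value.

-- ===== PORT A =====
def WINNERS : List Int := [10, 20, 30]

-- termination helper for the port's recursion (cited by decreasing_by)
lemma pyIdx?_some_lt {n : Nat} {i : Int} {k : Nat} (h : PySem.List.pyIdx? n i = some k) : k < n := by
  unfold PySem.List.pyIdx? at h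
  split_ifs at h <;> (injection h with h; omega)

lemma pyGet?_pySetD_self {α : Type} (xs : List α) (i : Int) (p v : α)
    (hp : PySem.List.pyGet? xs i = some p) :
    PySem.List.pyGet? (PySem.List.pySetD xs i v) i = some v := by
  unfold PySem.List.pyGet? PySem.List.pySetD PySem.List.pySet? at *
  cases hk : PySem.List.pyIdx? xs.length i with
  | none => rw [hk] at hp; simp at hp
  | some k =>
    have hklt : k < xs.length := pyIdx?_some_lt hk
    simp only [hk, Option.map_some, Option.getD_some, List.length_set]
    simp [hklt]

lemma popD_len_zero (xs : List Int) (h : 1 ≤ xs.length) :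
    ((PySem.List.pop? xs 0).getD (0, [])).2.length + 1 = xs.length := by
  unfold PySem.List.pop? PySem.List.pyIdx?
  cases xs with
  | nil => simp at h
  | cons x t => simp [List.eraseIdx]

lemma popD_len_last (xs : List Int) (h : 1 ≤ xs.length) :
    ((PySem.List.pop? xs).getD (0, [])).2.length + 1 = xs.length := by
  unfold PySem.List.pop? PySem.List.pyIdx?
  have h0 : ¬ (0:Int) ≤ -1 := by omega
  have h1 : -(xs.length : Int) ≤ -1 := by omega
  have h2 : xs.length - 1 < xs.length := by omega
  simp [h1, h2]
  omega

-- literal transliteration of A: recursive function, three pop-sequences, re-indexing juego[i] each call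
def jugar (mano : List Int) (juego : List (List Int)) (njuegos : Int) (i : Int) :
    List Int × List (List Int) × Int × Int :=
  match hp : PySem.List.pyGet? juego i with
  | none => (mano, juego, njuegos, i)  -- Python raises IndexError here; excluded by Pre_
  | some pila =>
    if h3 : 3 ≤ pila.length then
      if WINNERS.contains (PySem.List.pyGetD pila 0 0 + PySem.List.pyGetD pila 1 0 + PySem.List.pyGetD pila (-1) 0) then
        -- mano.append(pop(0)); mano.append(pop(0)); mano.append(pop())
        let s1 := (PySem.List.pop? pila 0).getD (0, [])
        let s2 := (PySem.List.pop? s1.2 0).getD (0, [])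
        let s3 := (PySem.List.pop? s2.2).getD (0, [])
        let mano' := mano ++ [s1.1] ++ [s2.1] ++ [s3.1]
        let juego' := PySem.List.pySetD juego i s3.2
        if s3.2.length = 0 then
          (mano', ((PySem.List.pop? juego' i).map Prod.snd).getD juego', njuegos - 1, i - 1)
        else jugar mano' juego' njuegos i
      else if WINNERS.contains (PySem.List.pyGetD pila 0 0 + PySem.List.pyGetD pila (-1) 0 + PySem.List.pyGetD pila (-2) 0) then
        -- mano.append(pop(0)); tmp = pop(); mano.append(pop()); mano.append(tmp)
        let s1 := (PySem.List.pop? pila 0).getD (0, [])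
        let s2 := (PySem.List.pop? s1.2).getD (0, [])
        let s3 := (PySem.List.pop? s2.2).getD (0, [])
        let mano' := mano ++ [s1.1] ++ [s3.1] ++ [s2.1]
        let juego' := PySem.List.pySetD juego i s3.2
        if s3.2.length = 0 then
          (mano', ((PySem.List.pop? juego' i).map Prod.snd).getD juego', njuegos - 1, i - 1)
        else jugar mano' juego' njuegos i
      else if WINNERS.contains (PySem.List.pyGetD pila (-1) 0 + PySem.List.pyGetD pila (-2) 0 + PySem.List.pyGetD pila (-3) 0) then
        -- tmp1 = pop(); tmp2 = pop(); mano.append(pop()); mano.append(tmp2); mano.append(tmp1)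
        let s1 := (PySem.List.pop? pila).getD (0, [])
        let s2 := (PySem.List.pop? s1.2).getD (0, [])
        let s3 := (PySem.List.pop? s2.2).getD (0, [])
        let mano' := mano ++ [s3.1] ++ [s2.1] ++ [s1.1]
        let juego' := PySem.List.pySetD juego i s3.2
        if s3.2.length = 0 then
          (mano', ((PySem.List.pop? juego' i).map Prod.snd).getD juego', njuegos - 1, i - 1)
        else jugar mano' juego' njuegos i
      else (mano, juego, njuegos, i)
    else (mano, juego, njuegos, i)
termination_by (PySem.List.pyGet? juego i).elim 0 List.length
decreasing_by
  · rw [pyGet?_pySetD_self juego i pila _ hp, hp]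
    simp only [Option.elim]
    have h1 := popD_len_zero pila (by omega)
    have h2 := popD_len_zero ((PySem.List.pop? pila 0).getD (0, [])).2 (by omega)
    have h3' := popD_len_last ((PySem.List.pop? ((PySem.List.pop? pila 0).getD (0, [])).2 0).getD (0, [])).2 (by omega)
    omega
  · rw [pyGet?_pySetD_self juego i pila _ hp, hp]
    simp only [Option.elim]
    have h1 := popD_len_zero pila (by omega)
    have h2 := popD_len_last ((PySem.List.pop? pila 0).getD (0, [])).2 (by omega)
    have h3' := popD_len_last ((PySem.List.pop? ((PySem.List.pop? pila 0).getD (0, [])).2).getD (0, [])).2 (by omega)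
    omega
  · rw [pyGet?_pySetD_self juego i pila _ hp, hp]
    simp only [Option.elim]
    have h1 := popD_len_last pila (by omega)
    have h2 := popD_len_last ((PySem.List.pop? pila).getD (0, [])).2 (by omega)
    have h3' := popD_len_last ((PySem.List.pop? ((PySem.List.pop? pila).getD (0, [])).2).getD (0, [])).2 (by omega)
    omega

-- ===== PORT B =====
-- the while loop of B: returns (mano, pile, emptied-by-a-win flag)
def jugarLoop (mano : List Int) (pila : List Int) : List Int × List Int × Bool :=
  if _h3 : 3 ≤ pila.length then
    let a := PySem.List.pyGetD pila 0 0
    let b := PySem.List.pyGetD pila 1 0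
    let x := PySem.List.pyGetD pila (-3) 0
    let y := PySem.List.pyGetD pila (-2) 0
    let z := PySem.List.pyGetD pila (-1) 0
    if WINNERS.contains (a + b + z) then
      let pila' := ((pila.dropLast).drop 1).drop 1   -- del pila[-1]; del pila[0]; del pila[0]
      if pila'.isEmpty then (mano ++ [a, b, z], pila', true)
      else jugarLoop (mano ++ [a, b, z]) pila'
    else if WINNERS.contains (a + y + z) then
      let pila' := ((pila.dropLast).dropLast).drop 1 -- del pila[-1]; del pila[-1]; del pila[0]
      if pila'.isEmpty then (mano ++ [a, y, z], pila', true)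
      else jugarLoop (mano ++ [a, y, z]) pila'
    else if WINNERS.contains (x + y + z) then
      let pila' := ((pila.dropLast).dropLast).dropLast -- del pila[-1] three times
      if pila'.isEmpty then (mano ++ [x, y, z], pila', true)
      else jugarLoop (mano ++ [x, y, z]) pila'
    else (mano, pila, false)
  else (mano, pila, false)
termination_by pila.length
decreasing_by
  all_goals (simp only [List.length_dropLast, List.length_drop]; omega)

def jugar_alt (mano : List Int) (juego : List (List Int)) (njuegos : Int) (i : Int) :
    List Int × List (List Int) × Int × Int :=
  match PySem.List.pyGet? juego i with
  | none => (mano, juego, njuegos, i)  -- Python raises IndexError here; excluded by Pre_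
  | some pila =>
    let r := jugarLoop mano pila
    if r.2.2 then
      (r.1, ((PySem.List.pop? juego i).map Prod.snd).getD juego, njuegos - 1, i - 1)
    else (r.1, PySem.List.pySetD juego i r.2.1, njuegos, i)

-- ===== PRECONDITION & SPEC =====
-- Pre_ excludes exactly the inputs where juego[i] raises IndexError (index out of range).
def Pre_jugar (mano : List Int) (juego : List (List Int)) (njuegos : Int) (i : Int) : Prop :=
  PySem.Raise.InRange juego.length i
instance (mano : List Int) (juego : List (List Int)) (njuegos : Int) (i : Int) : Decidable (Pre_jugar mano juego njuegos i) := by unfold Pre_jugar; infer_instance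
def pvWitness_jugar : List Int × List (List Int) × Int × Int := ([4], [[5, 5, 13, 10], [3]], 2, 0)

def Spec_jugar (mano : List Int) (juego : List (List Int)) (njuegos : Int) (i : Int) (out : List Int × List (List Int) × Int × Int) : Prop := out = jugar_alt mano juego njuegos i
instance (mano : List Int) (juego : List (List Int)) (njuegos : Int) (i : Int) (out : List Int × List (List Int) × Int × Int) : Decidable (Spec_jugar mano juego njuegos i out) := by unfold Spec_jugar; infer_instance

-- ===== CLAIM (what is proved, stated in full; the proofs are below) =====
def Claim_equal_jugar : Prop := ∀ (mano : List Int) (juego : List (List Int)) (njuegos : Int) (i : Int), Dom_jugar mano juego njuegos i → Pre_jugar mano juego njuegos i → Spec_jugar mano juego njuegos i (jugar mano juego njuegos i)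

-- ===== LEMMAS AND PROOFS =====

lemma pySetD_self {α : Type} (xs : List α) (i : Int) (p : α)
    (hp : PySem.List.pyGet? xs i = some p) : PySem.List.pySetD xs i p = xs := by
  unfold PySem.List.pyGet? at hp
  unfold PySem.List.pySetD PySem.List.pySet?
  cases hk : PySem.List.pyIdx? xs.length i with
  | none => simp
  | some k =>
    have hklt : k < xs.length := pyIdx?_some_lt hk
    rw [hk] at hp
    simp only [Option.bind_some, List.getElem?_eq_getElem hklt, Option.some.injEq] at hp
    simp [← hp, List.set_getElem_self hklt]


lemma pySetD_pySetD {α : Type} (xs : List α) (i : Int) (u v : α) :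
    PySem.List.pySetD (PySem.List.pySetD xs i u) i v = PySem.List.pySetD xs i v := by
  unfold PySem.List.pySetD PySem.List.pySet?
  cases hk : PySem.List.pyIdx? xs.length i with
  | none => simp [hk]
  | some k => simp [hk, List.length_set, List.set_set]

lemma popSnd_pySetD {α : Type} (xs : List α) (i : Int) (v : α) :
    ((PySem.List.pop? (PySem.List.pySetD xs i v) i).map Prod.snd).getD (PySem.List.pySetD xs i v)
      = ((PySem.List.pop? xs i).map Prod.snd).getD xs := by
  unfold PySem.List.pop? PySem.List.pySetD PySem.List.pySet?
  cases hk : PySem.List.pyIdx? xs.length i with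
  | none => simp [hk]
  | some k =>
    have hklt : k < xs.length := pyIdx?_some_lt hk
    simp [hk, List.length_set, List.eraseIdx_set_eq, hklt]

lemma exists_cons2_concat (pila : List Int) (h3 : 3 ≤ pila.length) :
    ∃ u v mid z, pila = u :: v :: (mid ++ [z]) := by
  match pila with
  | u :: v :: rest =>
    have h : rest ≠ [] := by intro h; simp [h] at h3
    exact ⟨u, v, rest.dropLast, rest.getLast h, by rw [List.dropLast_append_getLast h]⟩

lemma exists_cons_concat2 (pila : List Int) (h3 : 3 ≤ pila.length) :
    ∃ u mid y z, pila = u :: (mid ++ [y, z]) := by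
  obtain ⟨u, v, mid, z, rfl⟩ := exists_cons2_concat pila h3
  cases mid with
  | nil => exact ⟨u, [], v, z, rfl⟩
  | cons m ms =>
    have h : (m :: ms) ≠ [] := by simp
    obtain ⟨mid2, y, hy⟩ : ∃ mid2 y, m :: ms = mid2 ++ [y] :=
      ⟨(m :: ms).dropLast, (m :: ms).getLast h, (List.dropLast_append_getLast h).symm⟩
    exact ⟨u, v :: mid2, y, z, by simp [hy]⟩

lemma exists_concat3 (pila : List Int) (h3 : 3 ≤ pila.length) :
    ∃ front x y z, pila = front ++ [x, y, z] := by
  obtain ⟨u, mid, y, z, rfl⟩ := exists_cons_concat2 pila h3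
  cases mid with
  | nil => exact ⟨[], u, y, z, rfl⟩
  | cons m ms =>
    have h : (m :: ms) ≠ [] := by simp
    obtain ⟨mid2, x, hx⟩ : ∃ mid2 x, m :: ms = mid2 ++ [x] :=
      ⟨(m :: ms).dropLast, (m :: ms).getLast h, (List.dropLast_append_getLast h).symm⟩
    exact ⟨u :: mid2, x, y, z, by simp [hx]⟩

set_option maxHeartbeats 2000000 in
lemma jugar_eq_loop (n : Nat) :
    ∀ (pila mano : List Int) (juego : List (List Int)) (njuegos i : Int),
      pila.length ≤ n → PySem.List.pyGet? juego i = some pila →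
      jugar mano juego njuegos i =
        (if (jugarLoop mano pila).2.2 then
          ((jugarLoop mano pila).1, ((PySem.List.pop? juego i).map Prod.snd).getD juego, njuegos - 1, i - 1)
         else ((jugarLoop mano pila).1, PySem.List.pySetD juego i (jugarLoop mano pila).2.1, njuegos, i)) := by
  induction n with
  | zero =>
    intro pila mano juego njuegos i hn hp
    have h3 : ¬ 3 ≤ pila.length := by omega
    rw [jugar.eq_def, hp, jugarLoop.eq_def]
    simp [h3, pySetD_self juego i pila hp]
  | succ n ih =>
    intro pila mano juego njuegos i hn hp
    by_cases h3 : 3 ≤ pila.length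
    case neg =>
      rw [jugar.eq_def, hp, jugarLoop.eq_def]
      simp [h3, pySetD_self juego i pila hp]
    case pos =>
      rw [jugar.eq_def, hp, jugarLoop.eq_def]
      simp only [dif_pos h3, WINNERS]
      by_cases c1 : ([10, 20, 30] : List Int).contains (PySem.List.pyGetD pila 0 0 + PySem.List.pyGetD pila 1 0 + PySem.List.pyGetD pila (-1) 0) = true
      case pos =>
        obtain ⟨u, v, mid, z, rfl⟩ := exists_cons2_concat pila h3
        have hdl : (u :: v :: (mid ++ [z])).dropLast = u :: v :: mid := by
          rw [show u :: v :: (mid ++ [z]) = (u :: v :: mid) ++ [z] by simp]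
          exact List.dropLast_concat
        have g0 : PySem.List.pyGetD (u :: v :: (mid ++ [z])) 0 0 = u := by simp [pysem]
        have g1 : PySem.List.pyGetD (u :: v :: (mid ++ [z])) 1 0 = v := by simp [pysem]
        have gm1 : PySem.List.pyGetD (u :: v :: (mid ++ [z])) (-1) 0 = z := by simp [pysem]
        simp only [g0, g1, gm1] at c1 ⊢
        rw [if_pos c1, if_pos c1]
        simp only [PySem.List.pop?_zero_cons, Option.getD_some, PySem.List.pop?_last, hdl,
          List.drop_succ_cons, List.drop_zero]
        by_cases hm : mid = []
        · subst hm
          rw [popSnd_pySetD]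
          simp
        · have hm' : ¬ (mid.length = 0) := by simpa using hm
          rw [if_neg hm',
            ih mid _ (PySem.List.pySetD juego i mid) njuegos i
              (by simp at hn; omega) (pyGet?_pySetD_self juego i _ mid hp),
            popSnd_pySetD, pySetD_pySetD]
          simp [hm]
      case neg =>
      rw [if_neg c1, if_neg c1]
      by_cases c2 : ([10, 20, 30] : List Int).contains (PySem.List.pyGetD pila 0 0 + PySem.List.pyGetD pila (-1) 0 + PySem.List.pyGetD pila (-2) 0) = true
      case pos =>
        obtain ⟨u, mid, y, z, rfl⟩ := exists_cons_concat2 pila h3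
        have hyz : u :: (mid ++ [y, z]) = (u :: (mid ++ [y])) ++ [z] := by simp
        have hdl1 : (u :: (mid ++ [y, z])).dropLast = u :: (mid ++ [y]) := by
          rw [hyz]; exact List.dropLast_concat
        have hdl2 : (u :: (mid ++ [y])).dropLast = u :: mid := by
          rw [show u :: (mid ++ [y]) = (u :: mid) ++ [y] by simp]
          exact List.dropLast_concat
        have g0 : PySem.List.pyGetD (u :: (mid ++ [y, z])) 0 0 = u := by simp [pysem]
        have gm1 : PySem.List.pyGetD (u :: (mid ++ [y, z])) (-1) 0 = z := by simp [pysem]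
        have gm2 : PySem.List.pyGetD (u :: (mid ++ [y, z])) (-2) 0 = y := by simp [pysem]
        simp only [g0, gm1, gm2] at c2 ⊢
        rw [show u + z + y = u + y + z by ring] at c2 ⊢
        rw [if_pos c2, if_pos c2]
        have hpopz : PySem.List.pop? (mid ++ [y, z]) = some (z, mid ++ [y]) := by
          rw [show mid ++ [y, z] = (mid ++ [y]) ++ [z] by simp]
          exact PySem.List.pop?_last _ _
        simp only [PySem.List.pop?_zero_cons, Option.getD_some, hpopz, PySem.List.pop?_last,
          hdl1, hdl2, List.drop_succ_cons, List.drop_zero]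
        by_cases hm : mid = []
        · subst hm
          rw [popSnd_pySetD]
          simp
        · have hm' : ¬ (mid.length = 0) := by simpa using hm
          rw [if_neg hm',
            ih mid _ (PySem.List.pySetD juego i mid) njuegos i
              (by simp at hn; omega) (pyGet?_pySetD_self juego i _ mid hp),
            popSnd_pySetD, pySetD_pySetD]
          simp [hm]
      case neg =>
      have c2b : ¬ (([10, 20, 30] : List Int).contains (PySem.List.pyGetD pila 0 0 + PySem.List.pyGetD pila (-2) 0 + PySem.List.pyGetD pila (-1) 0) = true) := by
        rw [show PySem.List.pyGetD pila 0 0 + PySem.List.pyGetD pila (-2) 0 + PySem.List.pyGetD pila (-1) 0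
              = PySem.List.pyGetD pila 0 0 + PySem.List.pyGetD pila (-1) 0 + PySem.List.pyGetD pila (-2) 0 by ring]
        exact c2
      rw [if_neg c2, if_neg c2b]
      by_cases c3 : ([10, 20, 30] : List Int).contains (PySem.List.pyGetD pila (-1) 0 + PySem.List.pyGetD pila (-2) 0 + PySem.List.pyGetD pila (-3) 0) = true
      case pos =>
        obtain ⟨front, x, y, z, rfl⟩ := exists_concat3 pila h3
        have hxyz : front ++ [x, y, z] = ((front ++ [x]) ++ [y]) ++ [z] := by simp
        have hdl1 : (front ++ [x, y, z]).dropLast = front ++ [x, y] := by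
          rw [show front ++ [x, y, z] = (front ++ [x, y]) ++ [z] by simp]
          exact List.dropLast_concat
        have hdl2 : (front ++ [x, y]).dropLast = front ++ [x] := by
          rw [show front ++ [x, y] = (front ++ [x]) ++ [y] by simp]
          exact List.dropLast_concat
        have hdl3 : (front ++ [x]).dropLast = front := List.dropLast_concat
        have gm1 : PySem.List.pyGetD (front ++ [x, y, z]) (-1) 0 = z := by simp [pysem]
        have gm2 : PySem.List.pyGetD (front ++ [x, y, z]) (-2) 0 = y := by simp [pysem]
        have gm3 : PySem.List.pyGetD (front ++ [x, y, z]) (-3) 0 = x := by simp [pysem]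
        simp only [gm1, gm2, gm3] at c3 ⊢
        rw [show z + y + x = x + y + z by ring] at c3 ⊢
        rw [if_pos c3, if_pos c3]
        have hpop1 : PySem.List.pop? (front ++ [x, y, z]) = some (z, front ++ [x, y]) := by
          rw [show front ++ [x, y, z] = (front ++ [x, y]) ++ [z] by simp]
          exact PySem.List.pop?_last _ _
        have hpop2 : PySem.List.pop? (front ++ [x, y]) = some (y, front ++ [x]) := by
          rw [show front ++ [x, y] = (front ++ [x]) ++ [y] by simp]
          exact PySem.List.pop?_last _ _
        simp only [hpop1, hpop2, PySem.List.pop?_last, Option.getD_some, hdl1, hdl2, hdl3]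
        by_cases hm : front = []
        · subst hm
          rw [popSnd_pySetD]
          simp
        · have hm' : ¬ (front.length = 0) := by simpa using hm
          rw [if_neg hm',
            ih front _ (PySem.List.pySetD juego i front) njuegos i
              (by simp at hn; omega) (pyGet?_pySetD_self juego i _ front hp),
            popSnd_pySetD, pySetD_pySetD]
          simp [hm]
      case neg =>
        have c3b : ¬ (([10, 20, 30] : List Int).contains (PySem.List.pyGetD pila (-3) 0 + PySem.List.pyGetD pila (-2) 0 + PySem.List.pyGetD pila (-1) 0) = true) := by
          rw [show PySem.List.pyGetD pila (-3) 0 + PySem.List.pyGetD pila (-2) 0 + PySem.List.pyGetD pila (-1) 0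
                = PySem.List.pyGetD pila (-1) 0 + PySem.List.pyGetD pila (-2) 0 + PySem.List.pyGetD pila (-3) 0 by ring]
          exact c3
        rw [if_neg c3, if_neg c3b]
        simp [pySetD_self juego i pila hp]

-- ===== VERDICT (by name: the statement is the Claim_ definition above) =====
theorem jugar_spec : Claim_equal_jugar := by
  intro mano juego njuegos i _ hpre
  unfold Spec_jugar jugar_alt
  cases hp : PySem.List.pyGet? juego i with
  | none =>
    exact absurd hpre (by simpa [PySem.List.pyGet?_eq_none_iff] using hp)
  | some pila =>
    have := jugar_eq_loop pila.length pila mano juego njuegos i le_rfl hp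
    simp only [this]
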